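-- pv_equiv track=rewrite | github.com/Anuragmaurya-code/Neetcode | binary search/binarysearch.py | search
-- ===== SOURCE A (Python) =====
-- def search(nums: list[int], target: int) -> int:
--     l,r=0,len(nums)-1
--     while(l<=r):
--         mid=(r+l)//2
--         if nums[mid]==target:
--             return mid
--         elif nums[mid]<target:
--             l=mid+1
--         else:
--             r=mid-1
--     return -1
-- ===== SOURCE B (Python) =====
-- def search(nums: list[int], target: int) -> int:
--     def go(seg: list[int], off: int) -> int:
--         if not seg:
--             return -1
--         k = (len(seg) - 1) // 2
--         v = seg[k]
--         if v < target:
--             return go(seg[k + 1:], off + k + 1)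
--         if v > target:
--             return go(seg[:k], off)
--         return off + k
--     return go(nums, 0)
-- ===== Notes on version B (the rewrite author's own statement) =====
-- stated objective: alternative
-- what changed: Replaced the iterative lo/hi index loop with a divide-and-conquer recursion over list slices carrying an offset: each step probes the segment's own midpoint (len(seg)-1)//2 and recurses on seg[k+1:] or seg[:k]; the probe sequence is identical, so results match everywhere.
import Mathlib
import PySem

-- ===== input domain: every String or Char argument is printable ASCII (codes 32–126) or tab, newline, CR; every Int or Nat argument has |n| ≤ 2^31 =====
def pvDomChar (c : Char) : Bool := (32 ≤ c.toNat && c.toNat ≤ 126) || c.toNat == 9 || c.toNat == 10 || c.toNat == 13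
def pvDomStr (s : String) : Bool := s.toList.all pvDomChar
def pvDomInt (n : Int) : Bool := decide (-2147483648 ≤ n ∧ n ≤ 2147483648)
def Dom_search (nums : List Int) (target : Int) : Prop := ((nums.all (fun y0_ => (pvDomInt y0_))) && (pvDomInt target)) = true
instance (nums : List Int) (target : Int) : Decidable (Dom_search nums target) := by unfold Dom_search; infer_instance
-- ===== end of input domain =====

-- B replaces A's iterative lo/hi binary-search loop by divide-and-conquer recursion over list
-- slices with an offset (same probe sequence, so the returned index agrees on all inputs).


-- ===== PORT A =====
-- while-loop over the state (l, r); nums[mid] ported via pyGet? (always in range from the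
-- initial state since l ≤ mid ≤ r; the none branch returns -1 and is never reached)
def searchLoopA (nums : List Int) (target : Int) (l r : Int) : Int :=
  if h : l ≤ r then
    let mid := PySem.Int.floordiv (r + l) 2
    match PySem.List.pyGet? nums mid with
    | none => -1
    | some v =>
      if v = target then mid
      else if v < target then searchLoopA nums target (mid + 1) r
      else searchLoopA nums target l (mid - 1)
  else -1
termination_by (r + 1 - l).toNat
decreasing_by
  · have := PySem.Int.floordiv_two_mid_bounds (lo := l) (hi := r) h
    simp only [add_comm l r] at this; omega
  · have := PySem.Int.floordiv_two_mid_bounds (lo := l) (hi := r) h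
    simp only [add_comm l r] at this; omega

def search (nums : List Int) (target : Int) : Int :=
  searchLoopA nums target 0 (nums.length - 1)

-- ===== PORT B =====
-- go(seg, off) of Source B: divide and conquer on the segment itself; the slices seg[k+1:] and
-- seg[:k] with natural bounds are exactly List.drop (k+1) / List.take k (PySem slice_from_natCast /
-- slice_to_natCast), and (len(seg)-1)//2 on a nonempty seg is the exact Nat division (seg.length-1)/2
def goB (target : Int) (seg : List Int) (off : Int) : Int :=
  if hseg : seg = [] then -1
  else
    let k : Nat := (seg.length - 1) / 2
    let v := seg.getD k 0   -- seg[k], in range: k ≤ len-1 < len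
    if v < target then goB target (seg.drop (k + 1)) (off + (k : Int) + 1)
    else if target < v then goB target (seg.take k) off
    else off + (k : Int)
termination_by seg.length
decreasing_by
  · have : seg.length ≠ 0 := fun h => hseg (List.eq_nil_of_length_eq_zero h)
    simp only [List.length_drop]; omega
  · have : seg.length ≠ 0 := fun h => hseg (List.eq_nil_of_length_eq_zero h)
    simp only [List.length_take]; omega

def search_alt (nums : List Int) (target : Int) : Int :=
  goB target nums 0

-- ===== PRECONDITION & SPEC =====
def Spec_search (nums : List Int) (target : Int) (out : Int) : Prop := out = search_alt nums target
instance (nums : List Int) (target : Int) (out : Int) : Decidable (Spec_search nums target out) := by unfold Spec_search; infer_instance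

-- ===== CLAIM (what is proved, stated in full; the proofs are below) =====
def Claim_equal_search : Prop := ∀ (nums : List Int) (target : Int), Dom_search nums target → Spec_search nums target (search nums target)

-- ===== LEMMAS AND PROOFS =====
lemma loopA_eq_goB (nums : List Int) (target : Int) :
    ∀ n : Nat, ∀ l r : Int, 0 ≤ l → r < nums.length → (r + 1 - l).toNat ≤ n →
      searchLoopA nums target l r =
        goB target ((nums.drop l.toNat).take (r + 1 - l).toNat) l := by
  intro n
  induction n with
  | zero =>
    intro l r hl hr hn
    have hrl : r < l := by omega
    rw [searchLoopA, goB]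
    rw [dif_neg (not_le.mpr hrl), dif_pos (by simp [List.eq_nil_iff_length_eq_zero]; omega)]
  | succ n ih =>
    intro l r hl hr hn
    by_cases hlr : l ≤ r
    · set a := l.toNat with ha
      set m := (r + 1 - l).toNat with hm
      have hm1 : 1 ≤ m := by omega
      have hlen : ((nums.drop a).take m).length = m := by
        simp [List.length_take, List.length_drop]; omega
      have hne : (nums.drop a).take m ≠ [] := by
        intro h; rw [h] at hlen; simp at hlen; omega
      have hmid : PySem.Int.floordiv (r + l) 2 = l + ((m - 1) / 2 : Nat) := by
        rw [PySem.Int.floordiv_eq_ediv_of_pos (by omega)]; omega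
      have hak : a + (m - 1) / 2 < nums.length := by omega
      have hkm : (m - 1) / 2 < m := by omega
      have hv : ((nums.drop a).take m).getD ((m - 1) / 2) 0 = nums.getD (a + (m - 1) / 2) 0 := by
        simp [List.getD, hkm, List.getElem?_drop]
      have hget : PySem.List.pyGet? nums (l + (((m - 1) / 2 : Nat) : Int))
          = some (nums.getD (a + (m - 1) / 2) 0) := by
        have hcast : l + (((m - 1) / 2 : Nat) : Int) = ((a + (m - 1) / 2 : Nat) : Int) := by
          push_cast; omega
        rw [hcast, PySem.List.pyGet?_natCast, List.getD, List.getElem?_eq_getElem hak]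
        rfl
      rw [searchLoopA, goB, dif_pos hlr, dif_neg hne]
      simp only [hlen, hmid, hget, hv]
      rcases lt_trichotomy (nums.getD (a + (m - 1) / 2) 0) target with hlt | heq | hgt
      · rw [if_neg (ne_of_lt hlt), if_pos hlt, if_pos hlt]
        have hdrop : ((nums.drop a).take m).drop ((m - 1) / 2 + 1)
            = (nums.drop (l + (((m - 1) / 2 : Nat) : Int) + 1).toNat).take
                (r + 1 - (l + (((m - 1) / 2 : Nat) : Int) + 1)).toNat := by
          rw [List.drop_take, List.drop_drop]
          congr 1
          · omega
          · congr 1; omega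
        rw [hdrop]
        exact ih (l + (((m - 1) / 2 : Nat) : Int) + 1) r (by omega) hr (by omega)
      · rw [if_pos heq, if_neg (by omega), if_neg (by omega)]
      · rw [if_neg (ne_of_gt hgt), if_neg (not_lt.mpr hgt.le), if_neg (by omega),
          if_pos hgt]
        have htk : ((nums.drop a).take m).take ((m - 1) / 2)
            = (nums.drop l.toNat).take
                ((l + (((m - 1) / 2 : Nat) : Int) - 1) + 1 - l).toNat := by
          rw [List.take_take]
          congr 1
          omega
        rw [htk]
        exact ih l (l + (((m - 1) / 2 : Nat) : Int) - 1) hl (by omega) (by omega)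
    · rw [searchLoopA, goB, dif_neg hlr]
      rw [dif_pos (by simp [List.eq_nil_iff_length_eq_zero]; omega)]

-- ===== VERDICT (by name: the statement is the Claim_ definition above) =====
theorem search_spec : Claim_equal_search := by
  intro nums target _
  unfold Spec_search search search_alt
  by_cases hnil : nums = []
  · subst hnil; rw [searchLoopA, goB]; norm_num
  · have := loopA_eq_goB nums target nums.length 0 ((nums.length : Int) - 1)
      (by omega) (by have : 0 < nums.length := List.length_pos_of_ne_nil hnil; omega)
      (by omega)
    simpa using this
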